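-- pv_equiv track=rewrite | github.com/hereisVaibhav/Primer-Designing | Vaibhav/Primer-Dimers.py | check_primer_dimers
-- ===== SOURCE A (Python) =====
-- def check_primer_dimers(primer1, primer2, max_dimer_length=5):
--     """
--     Check for potential primer dimers between two primer sequences.
--
--     Args:
--     - primer1 (str): Sequence of the first primer.
--     - primer2 (str): Sequence of the second primer.
--     - max_dimer_length (int): Maximum length of the potential dimer.
--
--     Returns:
--     - dimer_positions (list): List of tuples containing start and end positions of potential dimers.
--     """
--     dimer_positions = []
--     for i in range(len(primer1) - max_dimer_length + 1):
--         for j in range(len(primer2) - max_dimer_length + 1):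
--             dimer1 = primer1[i:i+max_dimer_length]
--             dimer2 = primer2[j:j+max_dimer_length]
--             if dimer1 == dimer2[::-1]:
--                 dimer_positions.append((i, j))
--     return dimer_positions
-- ===== SOURCE B (Python) =====
-- def check_primer_dimers(primer1, primer2, max_dimer_length=5):
--     # Index the reversed windows of primer2 once, then look up each window of primer1.
--     index = {}
--     for j in range(len(primer2) - max_dimer_length + 1):
--         index.setdefault(primer2[j:j+max_dimer_length][::-1], []).append(j)
--     dimer_positions = []
--     for i in range(len(primer1) - max_dimer_length + 1):
--         for j in index.get(primer1[i:i+max_dimer_length], ()):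
--             dimer_positions.append((i, j))
--     return dimer_positions
-- ===== Notes on version B (the rewrite author's own statement) =====
-- stated objective: faster
-- what changed: Instead of comparing every window of primer1 against every window of primer2 (nested loops), B indexes the reversed k-windows of primer2 in a dict keyed by window content and then looks up each primer1 window, emitting the stored j positions in order.
import Mathlib
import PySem

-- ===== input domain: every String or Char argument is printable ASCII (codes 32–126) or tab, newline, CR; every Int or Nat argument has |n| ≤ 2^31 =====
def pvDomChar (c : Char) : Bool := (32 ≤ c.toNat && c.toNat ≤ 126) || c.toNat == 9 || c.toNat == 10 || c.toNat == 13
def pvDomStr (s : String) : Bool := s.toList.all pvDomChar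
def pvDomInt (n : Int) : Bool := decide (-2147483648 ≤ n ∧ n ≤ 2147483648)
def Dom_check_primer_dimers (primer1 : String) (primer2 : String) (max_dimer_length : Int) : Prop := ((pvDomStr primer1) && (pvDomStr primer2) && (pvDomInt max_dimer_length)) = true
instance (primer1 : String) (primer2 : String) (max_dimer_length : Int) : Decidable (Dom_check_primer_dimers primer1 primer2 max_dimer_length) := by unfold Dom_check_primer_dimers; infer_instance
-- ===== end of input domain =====

-- B replaces A's all-pairs window comparison by a dict indexing the reversed k-windows of
-- primer2 once, looked up per primer1 window (objective: faster, asymptotic).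

-- shared window helper: the Python slice s[i:i+k] on the character list
def pvWin (s : List Char) (k i : Int) : List Char := PySem.List.slice s (some i) (some (i + k))

-- ===== PORT A =====
-- nested loops; dimer2[::-1] is List.reverse (PySem.List.slice?_none_none_neg_one);
-- the string comparison '==' is equality of the character lists.
def check_primer_dimers (primer1 : String) (primer2 : String) (max_dimer_length : Int) : List (Int × Int) :=
  (PySem.List.pyRange 0 (PySem.Str.len primer1 - max_dimer_length + 1) 1).foldl (fun acc i =>
    (PySem.List.pyRange 0 (PySem.Str.len primer2 - max_dimer_length + 1) 1).foldl (fun acc2 j =>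
      let dimer1 := pvWin primer1.toList max_dimer_length i
      let dimer2 := pvWin primer2.toList max_dimer_length j
      if dimer1 = dimer2.reverse then acc2 ++ [(i, j)] else acc2) acc) []

-- ===== PORT B =====
-- index.setdefault(key, []).append(j) is Dict.modify key [] (· ++ [j]);
-- the second loop walks index.get(window, ()) appending (i, j).
def check_primer_dimers_alt (primer1 : String) (primer2 : String) (max_dimer_length : Int) : List (Int × Int) :=
  let index : PySem.Dict (List Char) (List Int) :=
    (PySem.List.pyRange 0 (PySem.Str.len primer2 - max_dimer_length + 1) 1).foldl
      (fun d j => d.modify ((pvWin primer2.toList max_dimer_length j).reverse) [] (· ++ [j]))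
      PySem.Dict.empty
  (PySem.List.pyRange 0 (PySem.Str.len primer1 - max_dimer_length + 1) 1).foldl
    (fun acc i =>
      (index.getD (pvWin primer1.toList max_dimer_length i) []).foldl
        (fun acc2 j => acc2 ++ [(i, j)]) acc) []

-- ===== PRECONDITION & SPEC =====
def Spec_check_primer_dimers (primer1 : String) (primer2 : String) (max_dimer_length : Int) (out : List (Int × Int)) : Prop := out = check_primer_dimers_alt primer1 primer2 max_dimer_length
instance (primer1 : String) (primer2 : String) (max_dimer_length : Int) (out : List (Int × Int)) : Decidable (Spec_check_primer_dimers primer1 primer2 max_dimer_length out) := by unfold Spec_check_primer_dimers; infer_instance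

-- ===== CLAIM (what is proved, stated in full; the proofs are below) =====
def Claim_equal_check_primer_dimers : Prop := ∀ (primer1 : String) (primer2 : String) (max_dimer_length : Int), Dom_check_primer_dimers primer1 primer2 max_dimer_length → Spec_check_primer_dimers primer1 primer2 max_dimer_length (check_primer_dimers primer1 primer2 max_dimer_length)

-- ===== LEMMAS AND PROOFS =====

-- B's index maps each window content w to the j's of primer2 whose reversed window is w, in order.
theorem pv_index_getD (key : Int → List Char) (js : List Int)
    (d : PySem.Dict (List Char) (List Int)) (w : List Char) :
    (js.foldl (fun d j => d.modify (key j) [] (· ++ [j])) d).getD w []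
      = d.getD w [] ++ js.filter (fun j => key j == w) := by
  have h := PySem.Dict.getD_foldl_modify_append (l := js.map (fun j => (key j, j))) (d := d) (c := w)
  rw [List.foldl_map] at h
  simpa [List.filter_map, Function.comp_def] using h

-- A's inner loop over js collects exactly the matching j's, paired with i.
theorem pv_inner_A (w1 : List Char) (key : Int → List Char) (i : Int) (js : List Int)
    (acc : List (Int × Int)) :
    (js.foldl (fun acc2 j => if w1 = (key j).reverse then acc2 ++ [(i, j)] else acc2) acc)
      = acc ++ (js.filter (fun j => (key j).reverse == w1)).map (fun j => (i, j)) := by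
  induction js generalizing acc with
  | nil => simp
  | cons j js ih =>
    simp only [List.foldl_cons, List.filter_cons]
    by_cases h : w1 = (key j).reverse
    · have hb : ((key j).reverse == w1) = true := by simp [h]
      rw [if_pos h, hb, ih]
      simp
    · have hb : ((key j).reverse == w1) = false := by simp; exact fun e => h e.symm
      rw [if_neg h, hb, ih]
      simp

-- ===== VERDICT (by name: the statement is the Claim_ definition above) =====
theorem check_primer_dimers_spec : Claim_equal_check_primer_dimers := by
  intro primer1 primer2 k _
  unfold Spec_check_primer_dimers check_primer_dimers check_primer_dimers_alt
  apply PySem.List.foldl_congr_mem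
  intro acc i _
  rw [pv_inner_A (pvWin primer1.toList k i) (fun j => pvWin primer2.toList k j) i,
    pv_index_getD (fun j => (pvWin primer2.toList k j).reverse) _ PySem.Dict.empty,
    PySem.List.foldl_append_singleton_eq_map]
  simp
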